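-- pv_equiv track=rewrite | github.com/KuiyuanFu/PythonLeetCode | .leetcode/672.bulb-switcher-ii.py | flipLights
-- ===== SOURCE A (Python) =====
-- def flipLights(n: int, presses: int) -> int:
--
--     signals = [0b111111, 0b101010, 0b010101, 0b001001]
--     n = min(n, 6)
--     signals = list(set([s & (2**n - 1) for s in signals]))
--     s = set([0])
--     for _ in range(presses):
--         sn = set()
--         for signal in signals:
--             for b in s:
--                 sn.add(signal ^ b)
--         if len(sn) == len(s):
--             break
--         s = sn
--     return len(s)
--
--     pass
-- ===== SOURCE B (Python) =====
-- def flipLights(n: int, presses: int) -> int: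
--     # Closed form: the reachable-state count depends only on min(n,3) and min(presses,3).
--     if n <= 0 or presses <= 0:
--         return 1
--     m, p = min(n, 3), min(presses, 3)
--     if m == 1:
--         return 2
--     if m == 2:
--         return 3 if p == 1 else 4
--     return 4 if p == 1 else (7 if p == 2 else 8)
-- ===== Notes on version B (the rewrite author's own statement) =====
-- stated objective: simpler
-- what changed: Replaced the BFS fixpoint iteration over XOR-reachable bulb states with the known closed-form table keyed by min(n,3) and min(presses,3).
import Mathlib
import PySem

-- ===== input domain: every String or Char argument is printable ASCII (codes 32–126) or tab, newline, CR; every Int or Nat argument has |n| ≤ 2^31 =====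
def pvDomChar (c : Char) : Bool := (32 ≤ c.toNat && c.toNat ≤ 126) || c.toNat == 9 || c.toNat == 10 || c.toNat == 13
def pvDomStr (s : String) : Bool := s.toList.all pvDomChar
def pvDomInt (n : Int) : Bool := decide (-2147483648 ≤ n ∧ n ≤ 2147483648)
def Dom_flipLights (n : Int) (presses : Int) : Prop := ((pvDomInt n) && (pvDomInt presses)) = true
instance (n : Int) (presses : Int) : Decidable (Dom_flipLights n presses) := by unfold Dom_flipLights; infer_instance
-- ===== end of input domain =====

-- B replaces A's BFS fixpoint iteration over XOR states by the closed-form table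
-- keyed by min(n,3) and min(presses,3); objective: simpler.

-- ===== PORT A =====
-- inner double loop: for signal in signals: for b in s: sn.add(signal ^ b)
def stepA (signals : List Int) (s : PySem.Set Int) : PySem.Set Int :=
  signals.foldl
    (fun sn signal => s.foldl (fun sn b => PySem.Set.add sn (PySem.Int.bxor signal b)) sn)
    PySem.Set.empty

-- for _ in range(presses): … with the early break when len(sn) == len(s)
def loopA (signals : List Int) : Nat → PySem.Set Int → PySem.Set Int
  | 0, s => s
  | k + 1, s =>
    let sn := stepA signals s
    if sn.length = s.length then s else loopA signals k sn

-- n = min(n, 6); mask = 2**n - 1 (exact for n ≥ 0, Pre_flipLights; for n < 0 Python raises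
-- TypeError); signals = list(set([s & mask for s in signals])); s = set([0]); return len(s)
def flipLights (n : Int) (presses : Int) : Int :=
  ((loopA
      (PySem.Set.ofList
        (([0b111111, 0b101010, 0b010101, 0b001001] : List Int).map
          (fun s => PySem.Int.band s (2 ^ (min n 6).toNat - 1))))
      presses.toNat (PySem.Set.ofList [0])).length : Int)

-- ===== PORT B =====
def flipLights_alt (n : Int) (presses : Int) : Int :=
  if n ≤ 0 ∨ presses ≤ 0 then 1
  else
    let m := min n 3
    let p := min presses 3
    if m = 1 then 2
    else if m = 2 then (if p = 1 then 3 else 4)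
    else if p = 1 then 4 else if p = 2 then 7 else 8

-- ===== PRECONDITION & SPEC =====
-- Pre_ excludes n < 0, where A raises TypeError (2**n is a float and `s & float` fails).
def Pre_flipLights (n : Int) (presses : Int) : Prop := 0 ≤ n
instance (n : Int) (presses : Int) : Decidable (Pre_flipLights n presses) := by
  unfold Pre_flipLights; infer_instance

def pvWitness_flipLights : Int × Int := (3, 2)

def Spec_flipLights (n : Int) (presses : Int) (out : Int) : Prop := out = flipLights_alt n presses
instance (n : Int) (presses : Int) (out : Int) : Decidable (Spec_flipLights n presses out) := by
  unfold Spec_flipLights; infer_instance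

-- ===== CLAIM (what is proved, stated in full; the proofs are below) =====
def Claim_equal_flipLights : Prop := ∀ (n : Int) (presses : Int), Dom_flipLights n presses → Pre_flipLights n presses → Spec_flipLights n presses (flipLights n presses)

-- ===== LEMMAS AND PROOFS =====

-- once one more press would not change the number of states, the loop breaks (or is out of fuel)
lemma loopA_stable (signals : List Int) (s : PySem.Set Int) (k : Nat)
    (h : (stepA signals s).length = s.length) : loopA signals k s = s := by
  cases k <;> simp [loopA, h]

lemma loopA_step (signals : List Int) (s : PySem.Set Int) (k : Nat)
    (h : (stepA signals s).length ≠ s.length) :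
    loopA signals (k + 1) s = loopA signals k (stepA signals s) := by
  simp [loopA, h]

lemma flipLights_min6 (n presses : Int) (h : 6 ≤ n) :
    flipLights n presses = flipLights 6 presses := by
  have : min n 6 = 6 := by omega
  simp only [flipLights, this]
  norm_num

lemma alt_min3 (n presses : Int) (h : 6 ≤ n) :
    flipLights_alt n presses = flipLights_alt 6 presses := by
  have h1 : ¬ (n ≤ 0) := by omega
  have h2 : min n 3 = 3 := by omega
  simp only [flipLights_alt, h1, h2, false_or]
  norm_num

lemma eq_of_toNat_big (sig : PySem.Set Int) (presses : Int) (hp : 3 ≤ presses)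
    (hchain : ∀ k : Nat, loopA sig (k + 1 + 1 + 1) (PySem.Set.ofList [0])
      = loopA sig 3 (PySem.Set.ofList [0])) :
    loopA sig presses.toNat (PySem.Set.ofList [0]) = loopA sig 3 (PySem.Set.ofList [0]) := by
  obtain ⟨k, hk⟩ : ∃ k, presses.toNat = k + 1 + 1 + 1 := ⟨presses.toNat - 3, by omega⟩
  rw [hk, hchain]

theorem flipLights_spec : Claim_equal_flipLights := by
  intro n presses _ hpre
  unfold Spec_flipLights
  unfold Pre_flipLights at hpre
  have hn : n = 0 ∨ n = 1 ∨ n = 2 ∨ n = 3 ∨ n = 4 ∨ n = 5 ∨ 6 ≤ n := by omega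
  have hp : presses ≤ 0 ∨ presses = 1 ∨ presses = 2 ∨ 3 ≤ presses := by omega
  -- reduce n ≥ 6 to n = 6
  have key : ∀ m : Int, 0 ≤ m → m ≤ 6 →
      flipLights m presses = flipLights_alt m presses := by
    intro m hm0 hm6
    rcases hp with hp | hp | hp | hp
    · -- presses ≤ 0: the loop never runs, both sides are 1
      have h0 : presses.toNat = 0 := by omega
      have hb : m ≤ 0 ∨ presses ≤ 0 := Or.inr hp
      simp [flipLights, flipLights_alt, h0, loopA, hb, PySem.Set.ofList]
    · subst hp
      interval_cases m <;> decide
    · subst hp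
      interval_cases m <;> decide
    · -- presses ≥ 3: the loop has converged after three presses
      have h1 : ¬ (presses ≤ 0) := by omega
      have h3 : min presses 3 = 3 := by omega
      rcases eq_or_lt_of_le hm0 with hz | hpos
      · -- m = 0: every masked signal is 0, so the very first press already breaks
        rw [← hz]
        rw [show flipLights 0 presses = ((loopA
              (PySem.Set.ofList
                (([0b111111, 0b101010, 0b010101, 0b001001] : List Int).map
                  (fun s => PySem.Int.band s (2 ^ (min (0:Int) 6).toNat - 1))))
              presses.toNat (PySem.Set.ofList [0])).length : Int) from rfl]
        rw [loopA_stable _ _ _ (by decide)]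
        simp only [flipLights_alt, if_pos (Or.inl (le_refl (0:Int)))]
        decide
      · have h1m : ¬ ((m ≤ 0) ∨ (presses ≤ 0)) := by omega
        interval_cases m <;>
          (unfold flipLights
           rw [eq_of_toNat_big _ presses hp (by
                intro k
                first
                | (rw [loopA_step _ _ _ (by decide), loopA_step _ _ _ (by decide),
                       loopA_step _ _ _ (by decide), loopA_stable _ _ _ (by decide)]; decide)
                | (rw [loopA_step _ _ _ (by decide), loopA_step _ _ _ (by decide),
                       loopA_stable _ _ _ (by decide)]; decide)
                | (rw [loopA_step _ _ _ (by decide), loopA_stable _ _ _ (by decide)]; decide))]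
           simp only [flipLights_alt, if_neg h1m, h3]
           decide)
  rcases hn with h | h | h | h | h | h | h
  · subst h; exact key 0 (by omega) (by omega)
  · subst h; exact key 1 (by omega) (by omega)
  · subst h; exact key 2 (by omega) (by omega)
  · subst h; exact key 3 (by omega) (by omega)
  · subst h; exact key 4 (by omega) (by omega)
  · subst h; exact key 5 (by omega) (by omega)
  · rw [flipLights_min6 n presses h, alt_min3 n presses h]
    exact key 6 (by omega) (by omega)
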